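-- pv_equiv track=rewrite | github.com/ShinjiKawamura255/flist-walker | src/fast_file_finder/ui_model.py | _find_match_positions
-- ===== SOURCE A (Python) =====
-- def _find_match_positions(text: str, query: str) -> set[int]:
--     if not query:
--         return set()
--
--     lower_text = text.lower()
--     lower_query = query.lower()
--
--     start = lower_text.find(lower_query)
--     if start >= 0:
--         return set(range(start, start + len(lower_query)))
--
--     positions: set[int] = set()
--     qi = 0
--     for ti, ch in enumerate(lower_text):
--         if qi < len(lower_query) and ch == lower_query[qi]:
--             positions.add(ti)
--             qi += 1
--     if qi == len(lower_query):
--         return positions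
--     return set()
-- ===== SOURCE B (Python) =====
-- def _find_match_positions(text: str, query: str) -> set[int]:
--     if not query:
--         return set()
--
--     lower_text = text.lower()
--     lower_query = query.lower()
--
--     start = lower_text.find(lower_query)
--     if start >= 0:
--         return set(range(start, start + len(lower_query)))
--
--     positions: set[int] = set()
--     idx = 0
--     for ch in lower_query:
--         found = lower_text.find(ch, idx)
--         if found == -1:
--             return set()
--         positions.add(found)
--         idx = found + 1
--     return positions
-- ===== Notes on version B (the rewrite author's own statement) =====
-- stated objective: alternative
-- what changed: The subsequence fallback is re-decomposed: instead of one pass over the text advancing a query pointer, B loops over the query characters and repeatedly calls lower_text.find(ch, idx) to locate each next needed character, failing as soon as a find returns -1.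
import Mathlib
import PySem

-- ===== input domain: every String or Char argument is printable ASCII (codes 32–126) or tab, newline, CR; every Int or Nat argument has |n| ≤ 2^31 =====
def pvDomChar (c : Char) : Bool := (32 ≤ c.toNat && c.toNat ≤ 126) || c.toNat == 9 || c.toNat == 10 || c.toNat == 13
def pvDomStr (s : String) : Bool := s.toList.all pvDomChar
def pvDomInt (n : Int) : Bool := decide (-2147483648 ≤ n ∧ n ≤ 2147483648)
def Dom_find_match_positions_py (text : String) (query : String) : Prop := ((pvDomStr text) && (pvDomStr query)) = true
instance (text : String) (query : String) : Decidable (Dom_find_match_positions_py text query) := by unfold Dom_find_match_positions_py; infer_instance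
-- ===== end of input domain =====

-- B replaces A's one-pass text scan (query-pointer subsequence fallback) by a loop over the
-- query chars that repeatedly calls text.find(ch, idx); same result, different decomposition
-- (objective: alternative). Empty-query guard and contiguous-substring phase are shared.


-- ===== PORT A =====
-- one step of A's `for ti, ch in enumerate(lower_text)` loop; state = (positions, qi)
def stepA (lq : List Char) (p : PySem.Set Int × Nat) (tc : Int × Char) : PySem.Set Int × Nat :=
  if p.2 < lq.length ∧ lq[p.2]? = some tc.2 then (PySem.Set.add p.1 tc.1, p.2 + 1) else p

def find_match_positions_py (text : String) (query : String) : List Int :=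
  if query.toList = [] then PySem.Set.empty
  else
    let lt := (PySem.Str.lower text).toList
    let lq := (PySem.Str.lower query).toList
    let start := PySem.Chars.find lt lq
    if 0 ≤ start then
      PySem.Set.ofList (PySem.List.pyRange start (start + lq.length) 1)
    else
      let st := (PySem.List.enumerate lt 0).foldl (stepA lq) (PySem.Set.empty, 0)
      if st.2 = lq.length then st.1 else PySem.Set.empty

-- ===== PORT B =====
-- B's `for ch in lower_query` loop: find the next needed char from index idx, or fail
def altGo (lt : List Char) : List Char → Int → PySem.Set Int → PySem.Set Int
  | [], _, positions => positions
  | c :: rest, idx, positions =>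
    let found := PySem.Chars.findFrom lt [c] idx
    if found = -1 then PySem.Set.empty
    else altGo lt rest (found + 1) (PySem.Set.add positions found)

def find_match_positions_py_alt (text : String) (query : String) : List Int :=
  if query.toList = [] then PySem.Set.empty
  else
    let lt := (PySem.Str.lower text).toList
    let lq := (PySem.Str.lower query).toList
    let start := PySem.Chars.find lt lq
    if 0 ≤ start then
      PySem.Set.ofList (PySem.List.pyRange start (start + lq.length) 1)
    else
      altGo lt lq 0 PySem.Set.empty

-- ===== PRECONDITION & SPEC =====
def Spec_find_match_positions_py (text : String) (query : String) (out : List Int) : Prop := out = find_match_positions_py_alt text query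
instance (text : String) (query : String) (out : List Int) : Decidable (Spec_find_match_positions_py text query out) := by unfold Spec_find_match_positions_py; infer_instance

-- ===== CLAIM (what is proved, stated in full; the proofs are below) =====
def Claim_equal_find_match_positions_py : Prop := ∀ (text : String) (query : String), Dom_find_match_positions_py text query → Spec_find_match_positions_py text query (find_match_positions_py text query)

-- ===== LEMMAS AND PROOFS =====

-- reference form of the greedy subsequence scan: walk the text consuming the remaining
-- query; returns (positions collected so far, unconsumed query)
def scanA : List Char → List Char → Int → List Int → (List Int × List Char)
  | [], q, _, acc => (acc, q)
  | _ :: s, [], ti, acc => scanA s [] (ti + 1) acc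
  | c :: s, d :: q, ti, acc =>
    if d = c then scanA s q (ti + 1) (acc ++ [ti]) else scanA s (d :: q) (ti + 1) acc

theorem scanA_nil_q (t : List Char) (ti : Int) (acc : List Int) :
    scanA t [] ti acc = (acc, []) := by
  induction t generalizing ti with
  | nil => rfl
  | cons c s ih => simpa [scanA] using ih (ti + 1)

theorem scanA_rest_len (t q : List Char) (ti : Int) (acc : List Int) :
    (scanA t q ti acc).2.length ≤ q.length := by
  induction t generalizing q ti acc with
  | nil => simp [scanA]
  | cons c s ih =>
    cases q with
    | nil => simp [scanA_nil_q]
    | cons d q' =>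
      by_cases h : d = c
      · simpa [scanA, h] using Nat.le_succ_of_le (ih q' (ti + 1) (acc ++ [ti]))
      · simpa [scanA, h] using ih (d :: q') (ti + 1) acc

theorem scanA_not_mem (t : List Char) (c : Char) (q : List Char) (ti : Int) (acc : List Int)
    (h : c ∉ t) : scanA t (c :: q) ti acc = (acc, c :: q) := by
  induction t generalizing ti with
  | nil => rfl
  | cons a s ih =>
    have hca : ¬ c = a := fun he => h (he ▸ List.mem_cons_self)
    simpa [scanA, hca] using ih (ti + 1) (fun hm => h (List.mem_cons_of_mem _ hm))

-- [c] is a prefix of t.drop n  ↔  t[n] = c (for n in range)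
theorem singleton_prefix_drop {t : List Char} {n : Nat} {c : Char} (hn : n < t.length) :
    [c] <+: t.drop n ↔ t[n] = c := by
  rw [List.drop_eq_getElem_cons hn]
  constructor
  · rintro ⟨r, hr⟩
    simp only [List.singleton_append] at hr
    injection hr with h1 _
    exact h1.symm
  · rintro rfl
    exact ⟨t.drop (n + 1), rfl⟩

theorem singleton_infix {t : List Char} {c : Char} : [c] <:+: t ↔ c ∈ t := by
  constructor
  · intro h
    exact List.singleton_sublist.mp h.sublist
  · intro h
    rcases List.append_of_mem h with ⟨s, r, rfl⟩
    exact ⟨s, r, by simp⟩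

-- skipping the non-matching text chars up to the first occurrence (index n) of c
theorem scanA_skip (t : List Char) (c : Char) (q : List Char) (acc : List Int) :
    ∀ (d k n : Nat), n - k = d → k ≤ n → (hn : n < t.length) → t[n] = c →
    (∀ i, k ≤ i → i < n → ∀ (hi : i < t.length), t[i] ≠ c) →
    scanA (t.drop k) (c :: q) (k : Int) acc
      = scanA (t.drop (n + 1)) q ((n : Int) + 1) (acc ++ [(n : Int)]) := by
  intro d
  induction d with
  | zero =>
    intro k n hd hk hn hc _
    have : k = n := by omega
    subst this
    rw [List.drop_eq_getElem_cons hn]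
    simp [scanA, hc]
  | succ m ih =>
    intro k n hd hk hn hc hmin
    have hkn : k < n := by omega
    have hkt : k < t.length := Nat.lt_trans hkn hn
    have hne : ¬ c = t[k] := fun he => hmin k le_rfl hkn hkt he.symm
    rw [List.drop_eq_getElem_cons hkt]
    simp only [scanA, if_neg hne]
    have := ih (k + 1) n (by omega) (by omega) hn hc
      (fun i hi1 hi2 hit => hmin i (by omega) hi2 hit)
    rw [← this]
    norm_num

-- A's enumerate-fold equals the reference scan (positions, and qi = consumed count)
theorem foldA_eq (lq : List Char) (t : List Char) :
    ∀ (qi : Nat) (ti : Int) (acc : List Int), qi ≤ lq.length → (∀ x ∈ acc, x < ti) →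
    (PySem.List.enumerate t ti).foldl (stepA lq) (acc, qi)
      = ((scanA t (lq.drop qi) ti acc).1,
         lq.length - (scanA t (lq.drop qi) ti acc).2.length) := by
  induction t with
  | nil =>
    intro qi ti acc hqi _
    simp only [PySem.List.enumerate_nil, List.foldl_nil, scanA]
    exact Prod.ext rfl (by simp; omega)
  | cons c s ih =>
    intro qi ti acc hqi hacc
    rw [PySem.List.enumerate_cons, List.foldl_cons]
    by_cases hlt : qi < lq.length
    · have hdrop : lq.drop qi = lq[qi] :: lq.drop (qi + 1) := List.drop_eq_getElem_cons hlt
      by_cases hc : lq[qi] = c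
      · have hcond : qi < lq.length ∧ lq[qi]? = some c := ⟨hlt, by rw [List.getElem?_eq_getElem hlt, hc]⟩
        have hadd : PySem.Set.add acc ti = acc ++ [ti] :=
          PySem.Set.add_of_not_mem (fun hm => absurd (hacc ti hm) (lt_irrefl ti))
        rw [show stepA lq (acc, qi) (ti, c) = (acc ++ [ti], qi + 1) by
          simp [stepA, hcond, hadd, hc]]
        rw [hdrop]
        simp only [scanA, if_pos hc]
        exact ih (qi + 1) (ti + 1) (acc ++ [ti]) hlt
          (fun x hx => by
            rcases List.mem_append.mp hx with h | h
            · exact lt_trans (hacc x h) (by omega)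
            · simp at h; omega)
      · have hcond : ¬ (qi < lq.length ∧ lq[qi]? = some c) := by
          rintro ⟨-, h2⟩
          rw [List.getElem?_eq_getElem hlt] at h2
          exact hc (Option.some.inj h2)
        rw [show stepA lq (acc, qi) (ti, c) = (acc, qi) by simp [stepA, hcond]]
        rw [hdrop]
        simp only [scanA, if_neg hc]
        rw [← hdrop]
        exact ih qi (ti + 1) acc hqi (fun x hx => lt_trans (hacc x hx) (by omega))
    · have hdrop : lq.drop qi = [] := List.drop_eq_nil_of_le (by omega)
      have hcond : ¬ (qi < lq.length ∧ lq[qi]? = some c) := fun h => hlt h.1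
      rw [show stepA lq (acc, qi) (ti, c) = (acc, qi) by simp [stepA, hcond]]
      rw [hdrop]
      simp only [scanA]
      rw [← hdrop]
      exact ih qi (ti + 1) acc hqi (fun x hx => lt_trans (hacc x hx) (by omega))

-- B's find-loop equals the reference scan (empty set exactly when the scan left query)
theorem altGo_eq (lt : List Char) :
    ∀ (q : List Char) (k : Nat) (acc : List Int), k ≤ lt.length →
    (∀ x ∈ acc, x < (k : Int)) →
    altGo lt q (k : Int) acc
      = (if (scanA (lt.drop k) q (k : Int) acc).2 = []
         then (scanA (lt.drop k) q (k : Int) acc).1 else PySem.Set.empty) := by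
  intro q
  induction q with
  | nil =>
    intro k acc _ _
    simp [altGo, scanA_nil_q]
  | cons c rest ih =>
    intro k acc hk hacc
    by_cases hf : PySem.Chars.findFrom lt [c] (k : Int) = -1
    · have hnot : c ∉ lt.drop k := fun hm =>
        ((PySem.Chars.findFrom_natCast_eq_neg_one_iff lt [c] k hk).mp hf)
          (singleton_infix.mpr hm)
      rw [scanA_not_mem _ _ _ _ _ hnot]
      simp [altGo, hf]
    · obtain ⟨hk1, hpre, hmin⟩ := PySem.Chars.findFrom_natCast_spec lt [c] k hk hf
      set f := PySem.Chars.findFrom lt [c] (k : Int) with hfdef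
      have h0 : (0 : Int) ≤ f := le_trans (Int.natCast_nonneg k) hk1
      have hfn : f = (f.toNat : Int) := (Int.toNat_of_nonneg h0).symm
      have hnlen : f.toNat < lt.length := by
        by_contra hge
        rw [List.drop_eq_nil_of_le (by omega)] at hpre
        exact absurd (List.prefix_nil.mp hpre) (by simp)
      have hcn : lt[f.toNat] = c := (singleton_prefix_drop hnlen).mp hpre
      have hkn : k ≤ f.toNat := by omega
      have hskip := scanA_skip lt c rest acc (f.toNat - k) k f.toNat rfl hkn hnlen hcn
        (fun i hi1 hi2 hit => fun he =>
          hmin i hi1 hi2 ((singleton_prefix_drop hit).mpr he))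
      have hadd : PySem.Set.add acc f = acc ++ [f] :=
        PySem.Set.add_of_not_mem (fun hm => by
          have := hacc f hm; omega)
      have hstep : altGo lt (c :: rest) (k : Int) acc
          = altGo lt rest ((f.toNat + 1 : Nat) : Int) (acc ++ [(f.toNat : Int)]) := by
        simp only [altGo, ← hfdef, if_neg hf, hadd]
        rw [hfn]
        push_cast
        rfl
      rw [hstep]
      rw [ih (f.toNat + 1) (acc ++ [(f.toNat : Int)]) (by omega)
        (fun x hx => by
          rcases List.mem_append.mp hx with h | h
          · have := hacc x h; push_cast; omega
          · simp at h; push_cast; omega)]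
      rw [hskip]
      norm_num

-- lower preserves nonemptiness
theorem lower_ne_nil {s : List Char} (h : s ≠ []) : PySem.Chars.lower s ≠ [] := by
  have hl : (PySem.Chars.lower s).length = s.length := by
    unfold PySem.Chars.lower; simp
  intro he
  apply h
  have := congrArg List.length he
  rw [hl] at this
  exact List.eq_nil_of_length_eq_zero this

theorem ports_eq (text query : String) :
    find_match_positions_py text query = find_match_positions_py_alt text query := by
  unfold find_match_positions_py find_match_positions_py_alt
  by_cases hq0 : query.toList = []
  · simp [hq0]
  · simp only [if_neg hq0]
    set lt := (PySem.Str.lower text).toList with hlt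
    set lq := (PySem.Str.lower query).toList with hlq
    by_cases hs : (0 : Int) ≤ PySem.Chars.find lt lq
    · simp [hs]
    · simp only [if_neg hs]
      have hA := foldA_eq lq lt 0 0 [] (by omega) (by simp)
      have hB := altGo_eq lt lq 0 [] (by omega) (by simp)
      simp only [Nat.cast_zero, List.drop_zero] at hA hB
      have he : (PySem.Set.empty : PySem.Set Int) = ([] : List Int) := rfl
      rw [he, hA, hB]
      have hle := scanA_rest_len lt lq 0 []
      have hq : lq ≠ [] := by
        rw [hlq, PySem.Str.toList_lower]
        exact lower_ne_nil hq0
      by_cases hr : (scanA lt lq 0 []).2 = []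
      · simp [hr]
      · have h1 : 1 ≤ (scanA lt lq 0 []).2.length := by
          rcases List.eq_nil_or_concat (scanA lt lq 0 []).2 with h | ⟨a, b, h⟩
          · exact absurd h hr
          · rw [h]; simp
        have h2 : 1 ≤ lq.length := by
          rcases List.eq_nil_or_concat lq with h | ⟨a, b, h⟩
          · exact absurd h hq
          · rw [h]; simp
        rw [if_neg hr, if_neg (by omega)]
        rfl

-- ===== VERDICT (by name: the statement is the Claim_ definition above) =====
theorem find_match_positions_py_spec : Claim_equal_find_match_positions_py := by
  intro text query _
  unfold Spec_find_match_positions_py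
  exact ports_eq text query
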